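-- pv_equiv track=rewrite | github.com/DancingOnAir/LeetcodePythonSolution | array/1424_diagonal_traverse_II.py | findDiagonalOrder2
-- ===== SOURCE A (Python) =====
-- from typing import List
--
-- def findDiagonalOrder2(nums: List[List[int]]) -> List[int]:
--     count = []
--     for i in range(len(nums)):
--         for j in range(len(nums[i])):
--             count.append((i + j, j, i))
--
--     count.sort()
--     res = []
--     for c in count:
--         res.append(nums[c[2]][c[1]])
--     return res
-- ===== SOURCE B (Python) =====
-- def findDiagonalOrder2(nums):
--     # Bucket elements by diagonal d = i + j (values on a diagonal arrive in
--     # j-descending order, so each bucket is emitted reversed); no sort needed.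
--     buckets = {}
--     for i, row in enumerate(nums):
--         for j, v in enumerate(row):
--             buckets.setdefault(i + j, []).append(v)
--     res = []
--     width = max(map(len, nums), default=0)
--     for d in range(len(nums) + width):
--         b = buckets.get(d)
--         if b is not None:
--             res.extend(reversed(b))
--     return res
-- ===== Notes on version B (the rewrite author's own statement) =====
-- stated objective: faster
-- what changed: Replaces building and lexicographically sorting a list of (diagonal, column, row) triples with a single pass that buckets values by diagonal d = i + j and emits each bucket reversed in increasing d, removing the sort entirely.
import Mathlib
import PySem

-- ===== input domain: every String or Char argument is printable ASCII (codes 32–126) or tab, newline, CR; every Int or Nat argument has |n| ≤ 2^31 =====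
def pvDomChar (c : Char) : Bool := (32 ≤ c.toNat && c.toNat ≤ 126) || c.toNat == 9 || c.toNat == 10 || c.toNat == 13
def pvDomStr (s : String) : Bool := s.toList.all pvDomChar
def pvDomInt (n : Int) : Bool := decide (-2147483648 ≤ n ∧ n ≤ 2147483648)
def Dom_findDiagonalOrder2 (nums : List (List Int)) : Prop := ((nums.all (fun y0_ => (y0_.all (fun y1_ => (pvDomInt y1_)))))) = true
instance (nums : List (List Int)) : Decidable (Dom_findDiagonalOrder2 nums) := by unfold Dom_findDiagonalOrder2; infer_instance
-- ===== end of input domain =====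

-- B replaces A's build-and-lex-sort of (diagonal, column, row) triples with a single
-- bucketing pass by diagonal d = i + j (each bucket emitted reversed), removing the sort.


-- ===== PORT A =====
-- Python sorts the triples lexicographically: ported as a sort with the lexicographic key below.
def findDiagonalOrder2 (nums : List (List Int)) : List Int :=
  let count : List (Int × Int × Int) :=
    (PySem.List.pyRange 0 (nums.length : Int)).foldl (fun acc i =>
      (PySem.List.pyRange 0 ((PySem.List.pyGetD nums i []).length : Int)).foldl
        (fun acc2 j => acc2 ++ [(i + j, j, i)]) acc) []
  let sortedCount := PySem.List.sorted count (fun c => toLex (c.1, toLex (c.2.1, c.2.2)))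
  -- nums[c[2]][c[1]]: both indices always in range, so the pyGetD defaults are unreachable
  sortedCount.foldl (fun res c =>
    res ++ [PySem.List.pyGetD (PySem.List.pyGetD nums c.2.2 []) c.2.1 0]) []

-- ===== PORT B =====
def findDiagonalOrder2_alt (nums : List (List Int)) : List Int :=
  let buckets : PySem.Dict Int (List Int) :=
    (PySem.List.enumerate nums).foldl (fun b ir =>
      (PySem.List.enumerate ir.2).foldl (fun b2 jv =>
        PySem.Dict.modify b2 (ir.1 + jv.1) [] (fun t => t ++ [jv.2])) b) PySem.Dict.empty
  let width : Int := PySem.List.maxD (nums.map (fun r => (r.length : Int))) (fun x => x) 0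
  (PySem.List.pyRange 0 ((nums.length : Int) + width)).foldl (fun res d =>
    match PySem.Dict.get? buckets d with
    | some b => res ++ b.reverse
    | none => res) []

-- ===== PRECONDITION & SPEC =====
def Spec_findDiagonalOrder2 (nums : List (List Int)) (out : List Int) : Prop := out = findDiagonalOrder2_alt nums
instance (nums : List (List Int)) (out : List Int) : Decidable (Spec_findDiagonalOrder2 nums out) := by unfold Spec_findDiagonalOrder2; infer_instance

-- ===== CLAIM (what is proved, stated in full; the proofs are below) =====
def Claim_equal_findDiagonalOrder2 : Prop := ∀ (nums : List (List Int)), Dom_findDiagonalOrder2 nums → Spec_findDiagonalOrder2 nums (findDiagonalOrder2 nums)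

-- ===== LEMMAS AND PROOFS =====

-- value of cell (i, j); both programs only read cells that exist, so the defaults are unreachable
def pvVal (nums : List (List Int)) (p : Nat × Nat) : Int := (nums.getD p.1 []).getD p.2 0
-- the triple A builds for cell (i, j)
def pvTrip (p : Nat × Nat) : Int × Int × Int := (((p.1 + p.2 : Nat) : Int), (p.2 : Int), (p.1 : Int))
-- all cells in row-major order (A's build order)
def pvCellsRow (nums : List (List Int)) : List (Nat × Nat) :=
  (List.range nums.length).flatMap (fun i => (List.range (nums.getD i []).length).map (fun j => (i, j)))
-- cells of diagonal d, in row-major (i-ascending, hence j-descending) order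
def pvDiag (nums : List (List Int)) (d : Nat) : List (Nat × Nat) :=
  (pvCellsRow nums).filter (fun p => p.1 + p.2 == d)
def pvWidth (nums : List (List Int)) : Nat := nums.foldl (fun m r => max m r.length) 0
-- all cells in A's sorted order: by diagonal, within a diagonal by ascending j
def pvCellsAll (nums : List (List Int)) : List (Nat × Nat) :=
  (List.range (nums.length + pvWidth nums)).flatMap (fun d => (pvDiag nums d).reverse)

theorem pvCellsRow_pairwise (nums : List (List Int)) :
    (pvCellsRow nums).Pairwise (fun p q => p.1 < q.1 ∨ (p.1 = q.1 ∧ p.2 < q.2)) := by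
  unfold pvCellsRow
  rw [List.pairwise_flatMap]
  refine ⟨fun i _ => ?_, ?_⟩
  · rw [List.pairwise_map]
    exact List.pairwise_lt_range.imp (fun h => Or.inr ⟨rfl, h⟩)
  · refine List.pairwise_lt_range.imp ?_
    intro a b hab x hx y hy
    simp only [List.mem_map, List.mem_range] at hx hy
    obtain ⟨j1, _, rfl⟩ := hx
    obtain ⟨j2, _, rfl⟩ := hy
    exact Or.inl hab

theorem pvCellsRow_nodup (nums : List (List Int)) : (pvCellsRow nums).Nodup := by
  refine (pvCellsRow_pairwise nums).imp ?_
  rintro p q (h | ⟨_, h⟩) rfl <;> exact absurd h (lt_irrefl _)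

theorem mem_pvCellsRow (nums : List (List Int)) (p : Nat × Nat) :
    p ∈ pvCellsRow nums ↔ p.1 < nums.length ∧ p.2 < (nums.getD p.1 []).length := by
  unfold pvCellsRow
  simp only [List.mem_flatMap, List.mem_range, List.mem_map]
  constructor
  · rintro ⟨i, hi, j, hj, rfl⟩; exact ⟨hi, hj⟩
  · rintro ⟨h1, h2⟩; exact ⟨p.1, h1, p.2, h2, rfl⟩

theorem pvWidth_bound (nums : List (List Int)) {i : Nat} (h : i < nums.length) :
    (nums.getD i []).length ≤ pvWidth nums := by
  unfold pvWidth
  have hm : nums.getD i [] ∈ nums := by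
    rw [List.getD_eq_getElem?_getD, List.getElem?_eq_getElem h]
    exact List.getElem_mem h
  have := PySem.List.le_foldl_max_nat nums (fun r => r.length) 0
  exact this.2 _ hm

theorem mem_pvCellsAll (nums : List (List Int)) (p : Nat × Nat) :
    p ∈ pvCellsAll nums ↔ p ∈ pvCellsRow nums := by
  unfold pvCellsAll
  simp only [List.mem_flatMap, List.mem_range, List.mem_reverse]
  constructor
  · rintro ⟨d, _, hp⟩
    exact (List.mem_filter.mp hp).1
  · intro hp
    refine ⟨p.1 + p.2, ?_, List.mem_filter.mpr ⟨hp, by simp⟩⟩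
    have h1 := ((mem_pvCellsRow nums p).mp hp).1
    have h2 := ((mem_pvCellsRow nums p).mp hp).2
    have := pvWidth_bound nums h1
    omega

theorem pvCellsAll_nodup (nums : List (List Int)) : (pvCellsAll nums).Nodup := by
  unfold pvCellsAll pvDiag
  rw [List.nodup_flatMap]
  refine ⟨fun d _ => List.nodup_reverse.mpr ((pvCellsRow_nodup nums).filter _), ?_⟩
  refine List.pairwise_lt_range.imp ?_
  intro d1 d2 h12 p hp1 hp2
  rw [List.mem_reverse, List.mem_filter] at hp1 hp2
  simp only [beq_iff_eq] at hp1 hp2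
  omega

theorem pvCellsAll_perm (nums : List (List Int)) : (pvCellsAll nums).Perm (pvCellsRow nums) := by
  rw [List.perm_ext_iff_of_nodup (pvCellsAll_nodup nums) (pvCellsRow_nodup nums)]
  exact mem_pvCellsAll nums

-- A's count list is the row-major cell list mapped to triples
theorem pvCount_eq (nums : List (List Int)) :
    (PySem.List.pyRange 0 (nums.length : Int)).foldl (fun acc i =>
      (PySem.List.pyRange 0 ((PySem.List.pyGetD nums i []).length : Int)).foldl
        (fun acc2 j => acc2 ++ [(i + j, j, i)]) acc) []
    = (pvCellsRow nums).map pvTrip := by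
  rw [PySem.List.pyRange_zero_natCast, List.foldl_map]
  have hcongr : ∀ (acc : List (Int × Int × Int)), ∀ i ∈ List.range nums.length,
      (PySem.List.pyRange 0 ((PySem.List.pyGetD nums (i : Int) []).length : Int)).foldl
        (fun acc2 j => acc2 ++ [((i : Int) + j, j, (i : Int))]) acc
      = acc ++ (List.range (nums.getD i []).length).map (fun j => pvTrip (i, j)) := by
    intro acc i hi
    rw [PySem.List.pyGetD_natCast, PySem.List.pyRange_zero_natCast, List.foldl_map,
      PySem.List.foldl_append_singleton_eq_map (f := fun j : Nat => (((i:Int) + (j:Int)), (j:Int), (i:Int)))]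
    simp [pvTrip]
  rw [PySem.List.foldl_congr_mem _ _ _ _ hcongr, PySem.List.foldl_append_eq_flatMap]
  unfold pvCellsRow
  simp only [List.map_flatMap, List.map_map]
  rfl

-- the sorted order of the triples is pvCellsAll
theorem pvSorted_eq (nums : List (List Int)) :
    PySem.List.sorted ((pvCellsRow nums).map pvTrip) (fun c => toLex (c.1, toLex (c.2.1, c.2.2)))
    = (pvCellsAll nums).map pvTrip := by
  apply PySem.List.sorted_eq_of_perm_of_pairwise_lt
  · exact (pvCellsAll_perm nums).map _
  · rw [List.pairwise_map]
    unfold pvCellsAll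
    rw [List.pairwise_flatMap]
    constructor
    · intro d _
      rw [List.pairwise_reverse]
      unfold pvDiag
      rw [List.pairwise_filter]
      refine (pvCellsRow_pairwise nums).imp ?_
      intro p q hpq hp hq
      simp only [beq_iff_eq] at hp hq
      simp only [pvTrip, Prod.Lex.toLex_lt_toLex]
      push_cast
      omega
    · refine List.pairwise_lt_range.imp ?_
      intro d1 d2 h12 x hx y hy
      unfold pvDiag at hx hy
      rw [List.mem_reverse, List.mem_filter] at hx hy
      simp only [beq_iff_eq] at hx hy
      simp only [pvTrip, Prod.Lex.toLex_lt_toLex]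
      left
      have : x.1 + x.2 < y.1 + y.2 := by omega
      exact_mod_cast this

theorem pvA_eq (nums : List (List Int)) :
    findDiagonalOrder2 nums = (pvCellsAll nums).map (pvVal nums) := by
  simp only [findDiagonalOrder2]
  rw [pvCount_eq, pvSorted_eq, PySem.List.foldl_append_singleton_eq_map, List.map_map,
    List.nil_append]
  refine List.map_congr_left ?_
  intro p hp
  simp [pvTrip, pvVal, PySem.List.pyGetD_natCast]

theorem pvFoldMax (l : List (List Int)) (a : Nat) :
    (l.map (fun r => (r.length : Int))).foldl max (a : Int) = ((l.foldl (fun m r => max m r.length) a : Nat) : Int) := by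
  induction l generalizing a with
  | nil => rfl
  | cons r t ih => simp only [List.map_cons, List.foldl_cons, ← Nat.cast_max, ih]

theorem pvWidthInt (nums : List (List Int)) :
    PySem.List.maxD (nums.map (fun r => (r.length : Int))) (fun x => x) 0 = (pvWidth nums : Int) := by
  unfold PySem.List.maxD pvWidth
  cases nums with
  | nil => rfl
  | cons r t =>
    rw [List.map_cons, PySem.List.max?_id_cons, Option.getD_some, List.foldl_cons,
      Nat.zero_max, pvFoldMax]

theorem pvStream_eq (nums : List (List Int)) :
    (PySem.List.enumerate nums).flatMap (fun ir => (PySem.List.enumerate ir.2).map (fun jv => (ir.1 + jv.1, jv.2)))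
    = (pvCellsRow nums).map (fun p => (((p.1 + p.2 : Nat) : Int), pvVal nums p)) := by
  unfold pvCellsRow
  rw [PySem.List.enumerate_eq_map_pyRange nums [], List.flatMap_map]
  have hlen : PySem.List.len nums = ((nums.length : Nat) : Int) := by simp [PySem.List.len]
  rw [hlen, PySem.List.pyRange_zero_natCast, List.flatMap_map, List.map_flatMap]
  congr 1
  funext i
  simp only []
  rw [PySem.List.pyGetD_natCast, PySem.List.enumerate_eq_map_pyRange _ (0 : Int), List.map_map]
  have hlen2 : PySem.List.len (nums.getD i []) = (((nums.getD i []).length : Nat) : Int) := by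
    simp [PySem.List.len]
  rw [hlen2, PySem.List.pyRange_zero_natCast, List.map_map, List.map_map]
  refine List.map_congr_left ?_
  intro j _
  simp [pvVal, PySem.List.pyGetD_natCast]

theorem pvBuckets_eq (nums : List (List Int)) (c : Int) :
    ((PySem.List.enumerate nums).foldl (fun b ir =>
      (PySem.List.enumerate ir.2).foldl (fun b2 jv =>
        PySem.Dict.modify b2 (ir.1 + jv.1) [] (fun t => t ++ [jv.2])) b) PySem.Dict.empty).getD c []
    = ((pvCellsRow nums).filter (fun p => ((p.1 + p.2 : Nat) : Int) == c)).map (pvVal nums) := by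
  have hstep : ∀ (b : PySem.Dict Int (List Int)), ∀ ir ∈ PySem.List.enumerate nums,
      (PySem.List.enumerate ir.2).foldl (fun b2 jv =>
        PySem.Dict.modify b2 (ir.1 + jv.1) [] (fun t => t ++ [jv.2])) b
      = ((PySem.List.enumerate ir.2).map (fun jv => (ir.1 + jv.1, jv.2))).foldl
          (fun b2 p => PySem.Dict.modify b2 p.1 [] (fun t => t ++ [p.2])) b := by
    intro b ir _
    rw [List.foldl_map]
  rw [PySem.List.foldl_congr_mem _ _ _ _ hstep, ← List.foldl_flatMap, pvStream_eq,
    PySem.Dict.getD_foldl_modify_append, List.filter_map, List.map_map]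
  simp only [PySem.Dict.getD_empty, List.nil_append]
  rfl

theorem pvFilter_cast (nums : List (List Int)) (d : Nat) :
    (pvCellsRow nums).filter (fun p => ((p.1 + p.2 : Nat) : Int) == ((d : Nat) : Int)) = pvDiag nums d := by
  unfold pvDiag
  apply List.filter_congr
  intro p _
  by_cases h : p.1 + p.2 = d
  · simp [h]
  · simp [h]
    omega

theorem pvB_eq (nums : List (List Int)) :
    findDiagonalOrder2_alt nums = (pvCellsAll nums).map (pvVal nums) := by
  simp only [findDiagonalOrder2_alt]
  rw [pvWidthInt,
    show ((nums.length : Int) + (pvWidth nums : Int)) = ((nums.length + pvWidth nums : Nat) : Int) by push_cast; rfl,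
    PySem.List.pyRange_zero_natCast, List.foldl_map]
  have hcongr : ∀ (res : List Int), ∀ d ∈ List.range (nums.length + pvWidth nums),
      (match PySem.Dict.get? ((PySem.List.enumerate nums).foldl (fun b ir =>
          (PySem.List.enumerate ir.2).foldl (fun b2 jv =>
            PySem.Dict.modify b2 (ir.1 + jv.1) [] (fun t => t ++ [jv.2])) b) PySem.Dict.empty) ((d : Nat) : Int) with
        | some b => res ++ b.reverse
        | none => res)
      = res ++ ((pvDiag nums d).map (pvVal nums)).reverse := by
    intro res d _
    have hgetD := pvBuckets_eq nums ((d : Nat) : Int)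
    rw [pvFilter_cast] at hgetD
    cases hget : PySem.Dict.get? ((PySem.List.enumerate nums).foldl (fun b ir =>
          (PySem.List.enumerate ir.2).foldl (fun b2 jv =>
            PySem.Dict.modify b2 (ir.1 + jv.1) [] (fun t => t ++ [jv.2])) b) PySem.Dict.empty) ((d : Nat) : Int) with
    | none =>
      rw [PySem.Dict.getD_eq_get?_getD, hget] at hgetD
      simp only [Option.getD_none] at hgetD
      rw [← hgetD]
      simp
    | some b =>
      rw [PySem.Dict.getD_eq_get?_getD, hget] at hgetD
      simp only [Option.getD_some] at hgetD
      rw [← hgetD]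
  rw [PySem.List.foldl_congr_mem _ _ _ _ hcongr, PySem.List.foldl_append_eq_flatMap,
    List.nil_append]
  unfold pvCellsAll
  simp only [List.map_flatMap, List.map_reverse]

-- ===== VERDICT (by name: the statement is the Claim_ definition above) =====
theorem findDiagonalOrder2_spec : Claim_equal_findDiagonalOrder2 := by
  intro nums _
  unfold Spec_findDiagonalOrder2
  rw [pvA_eq, pvB_eq]
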